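-- pv_equiv track=rewrite | github.com/joornl/J1939-Decoder | j1939-source-add-ingest.py | transTabsToSpaces
-- ===== SOURCE A (Python) =====
-- def transTabsToSpaces(iline):
--     in_dq = False
--     oline = ""
--
--     for c in iline:
--         if c == '"':
--             # Toggle if already inside double quote
--             if in_dq:
--                 in_dq = False
--             else:
--                 in_dq = True
--
--         if c == '\t' and in_dq:
--             c = ' '
--
--         oline += c
--
--     return oline
-- ===== SOURCE B (Python) =====
-- def transTabsToSpaces(iline):
--     parts = iline.split('"')
--     return '"'.join(p.replace('\t', ' ') if i % 2 else p
--                     for i, p in enumerate(parts))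
-- ===== Notes on version B (the rewrite author's own statement) =====
-- stated objective: faster
-- what changed: Replaces the per-character boolean state machine with repeated string concatenation by one split on the double-quote character into alternating outside/inside segments, a tab-to-space replace on the odd (inside) segments, and a join.
import Mathlib
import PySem

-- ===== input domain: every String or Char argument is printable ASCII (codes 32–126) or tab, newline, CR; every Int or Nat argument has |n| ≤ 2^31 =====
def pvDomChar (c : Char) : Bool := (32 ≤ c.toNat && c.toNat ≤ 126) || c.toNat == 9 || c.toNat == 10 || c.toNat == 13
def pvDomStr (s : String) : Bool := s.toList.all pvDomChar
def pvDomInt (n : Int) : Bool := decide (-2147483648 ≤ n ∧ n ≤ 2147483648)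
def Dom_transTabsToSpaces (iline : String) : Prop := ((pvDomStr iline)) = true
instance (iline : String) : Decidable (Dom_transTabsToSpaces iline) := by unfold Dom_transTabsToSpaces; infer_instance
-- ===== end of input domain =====

-- B replaces A's per-character quote state machine by split-on-'"' / replace tabs in odd segments / rejoin (idiomatic; return values proved equal).


-- ===== PORT A =====
-- literal port of A: fold over the characters carrying (in_dq, oline)
def transTabsToSpacesStep (st : Bool × List Char) (c : Char) : Bool × List Char :=
  let in_dq := if c = '"' then (if st.1 then false else true) else st.1
  let c' := if c = '\t' ∧ in_dq then ' ' else c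
  (in_dq, st.2 ++ [c'])

def transTabsToSpaces (iline : String) : String :=
  String.mk (iline.toList.foldl transTabsToSpacesStep (false, [])).2

-- ===== PORT B =====
-- literal port of Source B: split on '"', tab→space replace on odd-index parts, rejoin with '"'
def transTabsToSpaces_alt (iline : String) : String :=
  String.mk (PySem.Chars.join ['"']
    ((PySem.List.enumerate (PySem.Chars.splitOn iline.toList ['"'])).map
      (fun ip => if PySem.Int.mod ip.1 2 = 1 then PySem.Chars.replace ip.2 ['\t'] [' '] else ip.2)))

-- ===== PRECONDITION & SPEC =====
def Spec_transTabsToSpaces (iline : String) (out : String) : Prop := out = transTabsToSpaces_alt iline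
instance (iline : String) (out : String) : Decidable (Spec_transTabsToSpaces iline out) := by unfold Spec_transTabsToSpaces; infer_instance

-- ===== CLAIM (what is proved, stated in full; the proofs are below) =====
def Claim_equal_transTabsToSpaces : Prop := ∀ (iline : String), Dom_transTabsToSpaces iline → Spec_transTabsToSpaces iline (transTabsToSpaces iline)

-- ===== LEMMAS AND PROOFS =====

-- tab → space on a single char
def repTab (c : Char) : Char := if c = '\t' then ' ' else c

-- structural version of splitting on '"'
def mySplit : List Char → List (List Char)
  | [] => [[]]
  | c :: rest => if c = '"' then [] :: mySplit rest else (mySplit rest).modifyHead (c :: ·)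

theorem mySplit_ne_nil (l : List Char) : mySplit l ≠ [] := by
  cases l with
  | nil => simp [mySplit]
  | cons c rest =>
    simp only [mySplit]
    split_ifs
    · simp
    · cases h : mySplit rest with
      | nil => exact absurd h (mySplit_ne_nil rest)
      | cons p ps => simp

theorem splitOn_go_spec (fuel : Nat) (l cur : List Char) (h : l.length ≤ fuel)
    (accs : List (List Char)) :
    PySem.Chars.splitOn.go ['"'] fuel l cur accs = accs.reverse ++ (mySplit l).modifyHead (cur.reverse ++ ·) := by
  induction fuel generalizing l cur accs with
  | zero =>
    have : l = [] := List.length_eq_zero_iff.mp (Nat.le_zero.mp h)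
    subst this
    simp [PySem.Chars.splitOn.go, mySplit]
  | succ n ih =>
    cases l with
    | nil => simp [PySem.Chars.splitOn.go, mySplit]
    | cons c rest =>
      simp only [PySem.Chars.splitOn.go]
      simp only [List.length_cons] at h
      by_cases hc : c = '"'
      · subst hc
        have hpre : List.isPrefixOf ['"'] ('"' :: rest) = true := by simp [List.isPrefixOf]
        rw [if_pos hpre]
        simp only [List.length_cons, List.length_nil, List.drop_succ_cons, List.drop_zero]
        rw [ih rest [] (by omega) (cur.reverse :: accs)]
        cases hms : mySplit rest with
        | nil => exact absurd hms (mySplit_ne_nil rest)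
        | cons p ps => simp [mySplit, hms]
      · have hpre : List.isPrefixOf ['"'] (c :: rest) = false := by
          simp [List.isPrefixOf]
          exact fun h => hc h.symm
        rw [if_neg (by simp [hpre])]
        rw [ih rest (c :: cur) (by omega) accs]
        cases hms : mySplit rest with
        | nil => exact absurd hms (mySplit_ne_nil rest)
        | cons p ps => simp [mySplit, hc, hms]

theorem splitOn_eq_mySplit (l : List Char) : PySem.Chars.splitOn l ['"'] = mySplit l := by
  unfold PySem.Chars.splitOn
  rw [splitOn_go_spec (l.length + 1) l [] (by omega) []]
  cases hms : mySplit l with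
  | nil => exact absurd hms (mySplit_ne_nil l)
  | cons p ps => simp

theorem replace_go_spec (fuel : Nat) (l acc : List Char) (h : l.length ≤ fuel) :
    PySem.Chars.replace.go ['\t'] [' '] fuel l acc = acc.reverse ++ l.map repTab := by
  induction fuel generalizing l acc with
  | zero =>
    have : l = [] := List.length_eq_zero_iff.mp (Nat.le_zero.mp h)
    subst this
    simp [PySem.Chars.replace.go]
  | succ n ih =>
    cases l with
    | nil => simp [PySem.Chars.replace.go]
    | cons c rest =>
      simp only [PySem.Chars.replace.go, List.length_cons] at *
      by_cases hc : c = '\t'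
      · subst hc
        have hpre : List.isPrefixOf ['\t'] ('\t' :: rest) = true := by simp [List.isPrefixOf]
        rw [if_pos hpre]
        simp only [List.length_nil, List.drop_succ_cons, List.drop_zero,
          List.reverse_cons, List.reverse_nil, List.nil_append]
        rw [show ([' '] ++ acc) = ' ' :: acc from rfl, ih rest (' ' :: acc) (by omega)]
        simp [repTab]
      · have hpre : List.isPrefixOf ['\t'] (c :: rest) = false := by
          simp [List.isPrefixOf]
          exact fun h => hc h.symm
        rw [if_neg (by simp [hpre])]
        rw [ih rest (c :: acc) (by omega)]
        simp [repTab, hc]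

theorem replace_eq_map (l : List Char) : PySem.Chars.replace l ['\t'] [' '] = l.map repTab := by
  unfold PySem.Chars.replace
  rw [if_neg (by simp)]
  exact replace_go_spec l.length l [] le_rfl

-- characterization of A's loop output from a given state
def outA (b : Bool) : List Char → List Char
  | [] => []
  | c :: rest =>
    if c = '"' then '"' :: outA (!b) rest
    else (if c = '\t' ∧ b then ' ' else c) :: outA b rest

theorem foldA_spec (l : List Char) (b : Bool) (acc : List Char) :
    (l.foldl transTabsToSpacesStep (b, acc)).2 = acc ++ outA b l := by
  induction l generalizing b acc with
  | nil => simp [outA]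
  | cons c rest ih =>
    simp only [List.foldl_cons, transTabsToSpacesStep]
    by_cases hc : c = '"'
    · subst hc
      cases b <;> simp [ih, outA]
    · by_cases ht : c = '\t' <;> cases b <;> simp [hc, ht, ih, outA]

-- B's joined result expressed as an alternating recursion over the parts
def procJoin (b : Bool) : List (List Char) → List Char
  | [] => []
  | [p] => if b then p.map repTab else p
  | p :: q :: ps => (if b then p.map repTab else p) ++ '"' :: procJoin (!b) (q :: ps)

theorem outA_eq_procJoin (l : List Char) (b : Bool) : outA b l = procJoin b (mySplit l) := by
  induction l generalizing b with
  | nil => cases b <;> simp [outA, mySplit, procJoin]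
  | cons c rest ih =>
    by_cases hc : c = '"'
    · subst hc
      simp only [outA, mySplit, if_pos]
      cases hms : mySplit rest with
      | nil => exact absurd hms (mySplit_ne_nil rest)
      | cons p ps =>
        rw [ih (!b), hms]
        cases b <;> simp [procJoin]
    · simp only [outA, mySplit, if_neg hc]
      cases hms : mySplit rest with
      | nil => exact absurd hms (mySplit_ne_nil rest)
      | cons p ps =>
        rw [ih b, hms]
        cases ps with
        | nil =>
          by_cases ht : c = '\t' <;> cases b <;> simp [procJoin, repTab, ht]
        | cons q qs =>
          by_cases ht : c = '\t' <;> cases b <;> simp [procJoin, repTab, ht]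

-- the alternating map B performs via enumerate-index parity
def altMap (b : Bool) : List (List Char) → List (List Char)
  | [] => []
  | p :: ps => (if b then p.map repTab else p) :: altMap (!b) ps

theorem int_mod_two (k : Nat) : PySem.Int.mod (k : Int) 2 = 1 ↔ k % 2 = 1 := by
  have : PySem.Int.mod (k : Int) 2 = ((k % 2 : Nat) : Int) := by
    simp [PySem.Int.mod, Int.fmod_eq_emod]
  rw [this]
  omega

theorem enumMap_eq_altMap (parts : List (List Char)) (k : Nat) :
    (PySem.List.enumerate parts (k : Int)).map
      (fun ip => if PySem.Int.mod ip.1 2 = 1 then PySem.Chars.replace ip.2 ['\t'] [' '] else ip.2)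
      = altMap (decide (k % 2 = 1)) parts := by
  induction parts generalizing k with
  | nil => simp [PySem.List.enumerate, altMap]
  | cons p ps ih =>
    rw [PySem.List.enumerate_cons]
    simp only [List.map_cons, altMap]
    congr 1
    · rw [replace_eq_map]
      by_cases hk : k % 2 = 1
      · rw [if_pos ((int_mod_two k).mpr hk), if_pos (by simp [hk])]
      · rw [if_neg (fun h => hk ((int_mod_two k).mp h)), if_neg (by simp [hk])]
    · have hcast : ((k : Int) + 1) = ((k + 1 : Nat) : Int) := by push_cast; ring
      rw [hcast, ih (k + 1)]
      congr 1
      cases h : decide (k % 2 = 1) <;> simp at h <;> simp [Nat.add_mod] <;> omega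

theorem join_cons_cons' (x y : List Char) (ys : List (List Char)) :
    PySem.Chars.join ['"'] (x :: y :: ys) = x ++ '"' :: PySem.Chars.join ['"'] (y :: ys) := by
  simp [PySem.Chars.join, List.intercalate, List.intersperse]

theorem join_altMap (parts : List (List Char)) (b : Bool) :
    PySem.Chars.join ['"'] (altMap b parts) = procJoin b parts := by
  induction parts generalizing b with
  | nil => simp [altMap, procJoin, PySem.Chars.join, List.intercalate]
  | cons p ps ih =>
    cases ps with
    | nil => cases b <;> simp [altMap, procJoin, PySem.Chars.join, List.intercalate]
    | cons q qs =>
      have e1 : altMap b (p :: q :: qs)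
          = (if b then p.map repTab else p) :: (if !b then q.map repTab else q) :: altMap (!!b) qs := rfl
      rw [e1, join_cons_cons']
      have e2 : ((if !b then q.map repTab else q) :: altMap (!!b) qs) = altMap (!b) (q :: qs) := rfl
      rw [e2, ih (!b)]
      simp [procJoin]

-- ===== VERDICT (by name: the statement is the Claim_ definition above) =====
theorem transTabsToSpaces_spec : Claim_equal_transTabsToSpaces := by
  intro iline _
  unfold Spec_transTabsToSpaces transTabsToSpaces transTabsToSpaces_alt
  rw [foldA_spec, splitOn_eq_mySplit]
  rw [show ((0 : Int)) = ((0 : Nat) : Int) from rfl, enumMap_eq_altMap, join_altMap]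
  simp [outA_eq_procJoin]
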